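-- pv_equiv track=rewrite | github.com/zugdurchfahrt/seed-noise-consistency | tools.py | _canonical_bcp47
-- ===== SOURCE A (Python) =====
-- from typing import Iterable, Tuple, List
--
-- def _canonical_bcp47(tag: str) -> str:
--     """Leads a linguistic tag to the canonical appearance BCP47 by register.
--     As browsers return `es-ES`, `en-US`, not `es-es`.
--     """
--     if not tag:
--         return ""
--     parts = tag.replace("_", "-").split("-")
--     if not parts or not parts[0]:
--         return ""
--     lang = parts[0].lower()
--     rest: List[str] = []
--     i = 1
--     # script
--     if i < len(parts) and len(parts[i]) == 4 and parts[i].isalpha():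
--         rest.append(parts[i].title())
--         i += 1
--     # region
--     if i < len(parts):
--         p = parts[i]
--         if (len(p) == 2 and p.isalpha()) or (len(p) == 3 and p.isdigit()):
--             rest.append(p.upper())
--             i += 1
--     # variants/extensions (in the lower register)
--     while i < len(parts):
--         rest.append(parts[i].lower())
--         i += 1
--     return "-".join([lang, *rest])
-- ===== SOURCE B (Python) =====
-- from typing import List
--
-- def _canonical_bcp47(tag: str) -> str:
--     """Recursive re-implementation: classify subtags by structural recursion
--     on the list of subtags instead of an index cursor with a while loop."""
--     if not tag:
--         return ""
--     parts = tag.replace("_", "-").split("-")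
--     if not parts[0]:
--         return ""
--     return "-".join([parts[0].lower()] + _case_tail(parts[1:], True))
--
-- def _case_tail(subs: List[str], script_allowed: bool) -> List[str]:
--     if not subs:
--         return []
--     s, t = subs[0], subs[1:]
--     if script_allowed and len(s) == 4 and s.isalpha():
--         return [s.title()] + _case_tail(t, False)
--     if (len(s) == 2 and s.isalpha()) or (len(s) == 3 and s.isdigit()):
--         return [s.upper()] + [x.lower() for x in t]
--     return [x.lower() for x in subs]
-- ===== Notes on version B (the rewrite author's own statement) =====
-- stated objective: simpler
-- what changed: Replaces A's mutable index cursor with its three sequential positional blocks (script if, region if, trailing while loop) by a single structural recursion over the list of subtags carrying only a boolean flag for whether a script subtag is still admissible, emitting the lowercase tail with a comprehension.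
import Mathlib
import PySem

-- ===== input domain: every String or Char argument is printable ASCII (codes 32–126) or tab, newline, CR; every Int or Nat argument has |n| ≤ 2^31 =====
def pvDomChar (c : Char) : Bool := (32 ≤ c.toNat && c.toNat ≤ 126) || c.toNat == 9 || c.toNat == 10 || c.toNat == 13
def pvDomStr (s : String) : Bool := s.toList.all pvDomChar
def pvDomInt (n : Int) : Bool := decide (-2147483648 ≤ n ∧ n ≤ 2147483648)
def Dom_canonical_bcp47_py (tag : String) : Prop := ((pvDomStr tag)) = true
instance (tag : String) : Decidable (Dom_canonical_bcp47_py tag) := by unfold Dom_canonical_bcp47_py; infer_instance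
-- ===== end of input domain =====

-- B replaces A's index cursor + three positional if/while blocks by a structural
-- recursion over the list of subtags (objective: simpler; same cost).

-- ===== PORT A =====

-- str.title(): upper-case a letter after a non-letter, lower-case after a letter
-- (exact on the ASCII domain, where Python's "cased" = alphabetic)
def pvTitleChars (cs : List Char) (prevAlpha : Bool) : List Char :=
  match cs with
  | [] => []
  | c :: t =>
      (if prevAlpha then PySem.Chars.lowerChar c else PySem.Chars.upperChar c) ::
        pvTitleChars t (PySem.Chars.isalpha c)

def pvTitle (s : String) : String := String.ofList (pvTitleChars s.toList false)

-- A's trailing 'while i < len(parts): rest.append(parts[i].lower()); i += 1'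
def pvAWhile (parts : List String) (i : Nat) (rest : List String) : List String :=
  if h : i < parts.length then
    pvAWhile parts (i + 1) (rest ++ [PySem.Str.lower parts[i]])
  else rest
termination_by parts.length - i

def canonical_bcp47_py (tag : String) : String :=
  if tag = "" then ""
  else
    let parts := (PySem.Str.split? (PySem.Str.replace tag "_" "-") "-").getD []
    -- split with sep "-" ≠ "" always succeeds: .getD [] is exact
    -- 'if not parts or not parts[0]': parts[0] is read behind the short-circuit, so headD is exact
    if parts = [] ∨ parts.headD "" = "" then ""
    else
      let lang := PySem.Str.lower (parts.headD "")
      let rest : List String := []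
      let i : Nat := 1  -- i only moves forward from 1, and every read is guarded by i < len(parts)
      -- script
      let (rest, i) :=
        if i < parts.length ∧ PySem.Str.len (parts.getD i "") = 4 ∧
            PySem.Str.strIsalpha (parts.getD i "") = true then
          (rest ++ [pvTitle (parts.getD i "")], i + 1)
        else (rest, i)
      -- region
      let (rest, i) :=
        if i < parts.length ∧
            ((PySem.Str.len (parts.getD i "") = 2 ∧ PySem.Str.strIsalpha (parts.getD i "") = true) ∨
             (PySem.Str.len (parts.getD i "") = 3 ∧ PySem.Str.strIsdigit (parts.getD i "") = true)) then
          (rest ++ [PySem.Str.upper (parts.getD i "")], i + 1)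
        else (rest, i)
      -- variants/extensions (in the lower register)
      let rest := pvAWhile parts i rest
      PySem.Str.join "-" (lang :: rest)

-- ===== PORT B =====

def pvCaseTail (subs : List String) (scriptAllowed : Bool) : List String :=
  match subs with
  | [] => []
  | s :: t =>
      if scriptAllowed = true ∧ PySem.Str.len s = 4 ∧ PySem.Str.strIsalpha s = true then
        pvTitle s :: pvCaseTail t false
      else if (PySem.Str.len s = 2 ∧ PySem.Str.strIsalpha s = true) ∨
              (PySem.Str.len s = 3 ∧ PySem.Str.strIsdigit s = true) then
        PySem.Str.upper s :: t.map PySem.Str.lower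
      else (s :: t).map PySem.Str.lower

def canonical_bcp47_py_alt (tag : String) : String :=
  if tag = "" then ""
  else
    let parts := (PySem.Str.split? (PySem.Str.replace tag "_" "-") "-").getD []
    if parts.headD "" = "" then ""
    else PySem.Str.join "-" (PySem.Str.lower (parts.headD "") :: pvCaseTail parts.tail true)

-- ===== PRECONDITION & SPEC =====
def Spec_canonical_bcp47_py (tag : String) (out : String) : Prop := out = canonical_bcp47_py_alt tag
instance (tag : String) (out : String) : Decidable (Spec_canonical_bcp47_py tag out) := by unfold Spec_canonical_bcp47_py; infer_instance

-- ===== CLAIM (what is proved, stated in full; the proofs are below) =====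
def Claim_equal_canonical_bcp47_py : Prop := ∀ (tag : String), Dom_canonical_bcp47_py tag → Spec_canonical_bcp47_py tag (canonical_bcp47_py tag)

-- ===== LEMMAS AND PROOFS =====

lemma pvAWhile_eq (parts : List String) (i : Nat) (rest : List String) :
    pvAWhile parts i rest = rest ++ (parts.drop i).map PySem.Str.lower := by
  fun_induction pvAWhile parts i rest with
  | case1 i rest h ih =>
      rw [ih, List.drop_eq_getElem_cons h, List.map_cons, List.append_assoc,
        List.singleton_append]
  | case2 i rest h =>
      have hd : parts.drop i = [] := List.drop_eq_nil_of_le (by omega)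
      simp [hd]

set_option maxHeartbeats 1000000 in
lemma tail_eq (p0 : String) (subs : List String) :
    (let parts := p0 :: subs
     let rest : List String := []
     let i : Nat := 1
     let (rest, i) :=
       if i < parts.length ∧ PySem.Str.len (parts.getD i "") = 4 ∧
           PySem.Str.strIsalpha (parts.getD i "") = true then
         (rest ++ [pvTitle (parts.getD i "")], i + 1)
       else (rest, i)
     let (rest, i) :=
       if i < parts.length ∧
           ((PySem.Str.len (parts.getD i "") = 2 ∧ PySem.Str.strIsalpha (parts.getD i "") = true) ∨
            (PySem.Str.len (parts.getD i "") = 3 ∧ PySem.Str.strIsdigit (parts.getD i "") = true)) then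
         (rest ++ [PySem.Str.upper (parts.getD i "")], i + 1)
       else (rest, i)
     pvAWhile parts i rest) = pvCaseTail subs true := by
  match subs with
  | [] => simp [pvCaseTail, pvAWhile_eq]
  | [s] =>
      simp only [pvCaseTail]
      split_ifs <;> simp_all [pvAWhile_eq, List.getD] <;>
        rcases ‹_ ∨ _› with ⟨_, _⟩ | ⟨_, _⟩ <;> simp_all
  | s :: u :: v =>
      simp only [pvCaseTail]
      split_ifs <;> simp_all [pvAWhile_eq, List.getD] <;>
        rcases ‹_ ∨ _› with ⟨_, _⟩ | ⟨_, _⟩ <;> simp_all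

-- ===== VERDICT (by name: the statement is the Claim_ definition above) =====
theorem canonical_bcp47_py_spec : Claim_equal_canonical_bcp47_py := by
  intro tag _
  unfold Spec_canonical_bcp47_py canonical_bcp47_py canonical_bcp47_py_alt
  by_cases h : tag = ""
  · subst h; decide
  · rw [if_neg h, if_neg h]
    generalize (PySem.Str.split? (PySem.Str.replace tag "_" "-") "-").getD [] = parts
    match parts with
    | [] => simp
    | p0 :: subs =>
      by_cases h0 : p0 = ""
      · simp [h0]
      · simp only [List.headD_cons, h0, List.cons_ne_nil, false_or, if_false, List.tail_cons]
        exact congrArg (fun r => PySem.Str.join "-" (PySem.Str.lower p0 :: r)) (tail_eq p0 subs)
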